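-- pv_equiv track=rewrite | github.com/mattyonweb/chip8-experiments | compiler/linker.py | return_table
-- ===== SOURCE A (Python) =====
-- def return_table(lines, spirits_table):
--     table = spirits_table
--
--     i = 512
--
--     for l in lines:
--         if ":" in l:
--             table[l[:-1]] = "{:03X}".format(i)
--             continue
--         i += 2
--
--     return table
-- ===== SOURCE B (Python) =====
-- def return_table(lines, spirits_table):
--     # Pass 1: prefix address table; addrs[k] = address in effect before line k.
--     addrs = [512]
--     a = 512
--     for l in lines:
--         a += 0 if ":" in l else 2
--         addrs.append(a)
--     # Pass 2: map each label line to its prefix address.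
--     for l, addr in zip(lines, addrs):
--         if ":" in l:
--             spirits_table[l[:-1]] = "{:03X}".format(addr)
--     return spirits_table
-- ===== Notes on version B (the rewrite author's own statement) =====
-- stated objective: alternative
-- what changed: Replaces the single loop with a mutable address counter by a two-pass decomposition: first build a prefix array of addresses (one per line, offset so non-label lines advance it), then a second pass zips lines with their prefix addresses and writes only the label entries.
import Mathlib
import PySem

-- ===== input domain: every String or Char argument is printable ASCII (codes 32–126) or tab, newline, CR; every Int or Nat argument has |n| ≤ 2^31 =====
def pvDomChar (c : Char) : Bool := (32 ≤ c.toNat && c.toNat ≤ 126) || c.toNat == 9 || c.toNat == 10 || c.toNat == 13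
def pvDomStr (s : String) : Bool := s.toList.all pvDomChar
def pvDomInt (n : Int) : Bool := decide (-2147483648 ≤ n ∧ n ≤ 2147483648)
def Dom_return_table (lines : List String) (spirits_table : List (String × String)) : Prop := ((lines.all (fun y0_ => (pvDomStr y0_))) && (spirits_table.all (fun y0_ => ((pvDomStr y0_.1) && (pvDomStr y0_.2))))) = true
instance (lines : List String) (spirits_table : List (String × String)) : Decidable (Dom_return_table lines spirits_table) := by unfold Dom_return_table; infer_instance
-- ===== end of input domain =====

-- B replaces A's single loop with a mutable address counter by a prefix-address
-- table built in one pass plus a second mapping pass (objective: alternative).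
-- A mutates spirits_table (a dict) in place; B performs the same mutation; the
-- equivalence proved here is about the returned table.

-- "{:03X}".format(i): uppercase hex, zero-padded to width 3.  Exact for the
-- nonnegative i both programs pass (the counter starts at 512 and only grows).
def hexDig (d : Nat) : Char := if d < 10 then Char.ofNat (48 + d) else Char.ofNat (55 + d)
def hexChars (n : Nat) : List Char :=
  if _h : n < 16 then [hexDig n] else hexChars (n / 16) ++ [hexDig (n % 16)]
  decreasing_by exact Nat.div_lt_self (by omega) (by omega)
def hex3 (i : Int) : String :=
  let cs := hexChars i.toNat
  String.ofList (List.replicate (3 - cs.length) '0' ++ cs)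

-- ===== PORT A =====
-- the one loop of A: state = (table so far, current address i)
def return_table (lines : List String) (spirits_table : List (String × String)) : List (String × String) :=
  (lines.foldl
    (fun (st : PySem.Dict String String × Int) l =>
      if PySem.Str.isIn ":" l then
        (st.1.insert (PySem.Str.slice l none (some (-1))) (hex3 st.2), st.2)
      else
        (st.1, st.2 + 2))
    (PySem.Dict.ofList spirits_table, 512)).1.items

-- ===== PORT B =====
-- pass 1 of B: the prefix address array (addrs[k] = address before line k)
def pvBuildAddrs (lines : List String) : List Int :=
  (lines.foldl
    (fun (st : List Int × Int) l =>
      let a := st.2 + (if PySem.Str.isIn ":" l then 0 else 2)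
      (st.1 ++ [a], a))
    ([512], 512)).1

def return_table_alt (lines : List String) (spirits_table : List (String × String)) : List (String × String) :=
  -- pass 2 of B: zip lines with their prefix addresses, write the label entries
  ((List.zip lines (pvBuildAddrs lines)).foldl
    (fun (d : PySem.Dict String String) p =>
      if PySem.Str.isIn ":" p.1 then
        d.insert (PySem.Str.slice p.1 none (some (-1))) (hex3 p.2)
      else d)
    (PySem.Dict.ofList spirits_table)).items

-- ===== PRECONDITION & SPEC =====
def Spec_return_table (lines : List String) (spirits_table : List (String × String)) (out : List (String × String)) : Prop := out = return_table_alt lines spirits_table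
instance (lines : List String) (spirits_table : List (String × String)) (out : List (String × String)) : Decidable (Spec_return_table lines spirits_table out) := by unfold Spec_return_table; infer_instance

-- ===== CLAIM (what is proved, stated in full; the proofs are below) =====
def Claim_equal_return_table : Prop := ∀ (lines : List String) (spirits_table : List (String × String)), Dom_return_table lines spirits_table → Spec_return_table lines spirits_table (return_table lines spirits_table)

-- ===== LEMMAS AND PROOFS =====

-- addresses after consuming each line, starting from i
def tailAddrs (i : Int) : List String → List Int
  | [] => []
  | l :: ls =>
    let j := i + (if PySem.Str.isIn ":" l then 0 else 2)
    j :: tailAddrs j ls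

lemma build_eq (lines : List String) : ∀ (acc : List Int) (a : Int),
    (lines.foldl
      (fun (st : List Int × Int) l =>
        let a := st.2 + (if PySem.Str.isIn ":" l then 0 else 2)
        (st.1 ++ [a], a))
      (acc, a)).1 = acc ++ tailAddrs a lines := by
  induction lines with
  | nil => intro acc a; simp [tailAddrs]
  | cons l ls ih =>
    intro acc a
    simp only [List.foldl_cons, tailAddrs]
    rw [ih]
    simp

lemma key_lemma (lines : List String) : ∀ (d : PySem.Dict String String) (i : Int),
    (lines.foldl
      (fun (st : PySem.Dict String String × Int) l =>
        if PySem.Str.isIn ":" l then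
          (st.1.insert (PySem.Str.slice l none (some (-1))) (hex3 st.2), st.2)
        else
          (st.1, st.2 + 2))
      (d, i)).1
    = ((List.zip lines (i :: tailAddrs i lines)).foldl
        (fun (d : PySem.Dict String String) p =>
          if PySem.Str.isIn ":" p.1 then
            d.insert (PySem.Str.slice p.1 none (some (-1))) (hex3 p.2)
          else d)
        d) := by
  induction lines with
  | nil => intro d i; simp
  | cons l ls ih =>
    intro d i
    by_cases h : PySem.Str.isIn ":" l = true
    · simp only [List.foldl_cons, tailAddrs, h, if_true, List.zip_cons_cons]
      rw [ih]
      norm_num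
    · simp only [List.foldl_cons, tailAddrs, h, if_false, List.zip_cons_cons,
        Bool.false_eq_true]
      rw [ih]

-- ===== VERDICT (by name: the statement is the Claim_ definition above) =====
theorem return_table_spec : Claim_equal_return_table := by
  intro lines spirits_table _
  unfold Spec_return_table return_table return_table_alt pvBuildAddrs
  rw [key_lemma, build_eq]
  rfl
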